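-- pv_equiv track=rewrite | github.com/tgernhar/00200-HG_SW_Stuecklisten_ERP | backend/app/services/hugwawi_csv_export.py | _csv_escape
-- ===== SOURCE A (Python) =====
-- def _csv_escape(value: str) -> str:
--     """
--     Minimales CSV-Escaping (Semikolon-separiert).
--     Wir quoten nur, wenn nötig (Semikolon/Zeilenumbruch/Quote).
--     """
--     if value is None:
--         return ""
--     s = str(value)
--     if any(ch in s for ch in (';', '\n', '\r', '"')):
--         s = s.replace('"', '""')
--         return f'"{s}"'
--     return s
-- ===== SOURCE B (Python) =====
-- def _csv_escape(value: str) -> str: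
--     # Single pass: build the quote-doubled text and the needs-quote flag together.
--     if value is None:
--         return ""
--     s = str(value)
--     buf = []
--     needs_quote = False
--     for ch in s:
--         if ch == '"':
--             buf.append('""')
--             needs_quote = True
--         else:
--             buf.append(ch)
--             if ch == ';' or ch == '\n' or ch == '\r':
--                 needs_quote = True
--     if needs_quote:
--         return '"' + ''.join(buf) + '"'
--     return s
-- ===== Notes on version B (the rewrite author's own statement) =====
-- stated objective: alternative
-- what changed: Replaces A's separate membership scan (any of four 'ch in s' substring searches) plus a whole-string .replace with one pass over the characters that builds the quote-doubled buffer and the needs-quote flag together.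
import Mathlib
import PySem

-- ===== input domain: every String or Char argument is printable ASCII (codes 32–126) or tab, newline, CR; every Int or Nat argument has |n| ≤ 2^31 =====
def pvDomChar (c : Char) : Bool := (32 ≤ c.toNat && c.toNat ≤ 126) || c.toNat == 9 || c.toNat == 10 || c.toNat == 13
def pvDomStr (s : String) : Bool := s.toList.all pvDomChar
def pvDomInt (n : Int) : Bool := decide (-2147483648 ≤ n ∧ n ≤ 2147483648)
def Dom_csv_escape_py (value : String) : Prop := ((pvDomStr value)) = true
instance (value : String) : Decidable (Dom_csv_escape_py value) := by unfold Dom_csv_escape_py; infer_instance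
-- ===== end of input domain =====

-- B fuses A's membership scan and .replace into one pass (alternative decomposition, same cost).
-- The Python value is a str (the 'value is None' branch is outside the String type).

-- ===== PORT A =====
def csv_escape_py (value : String) : String :=
  -- any(ch in s for ch in (';', '\n', '\r', '"'))
  if [";", "\n", "\r", "\""].any (fun ch => PySem.Str.isIn ch value) then
    -- s = s.replace('"', '""'); return f'"{s}"'  (f-string concatenation done on the char list, exact)
    String.ofList ('"' :: (PySem.Str.replace value "\"" "\"\"").toList ++ ['"'])
  else value

-- ===== PORT B =====
def csvAltStep (st : List Char × Bool) (c : Char) : List Char × Bool :=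
  if c = '"' then (st.1 ++ ['"', '"'], true)
  else (st.1 ++ [c], st.2 || (c = ';' || c = '\n' || c = '\r'))

def csv_escape_py_alt (value : String) : String :=
  let st := value.toList.foldl csvAltStep ([], false)
  if st.2 then String.ofList ('"' :: st.1 ++ ['"']) else value

-- ===== PRECONDITION & SPEC =====
def Spec_csv_escape_py (value : String) (out : String) : Prop := out = csv_escape_py_alt value
instance (value : String) (out : String) : Decidable (Spec_csv_escape_py value out) := by unfold Spec_csv_escape_py; infer_instance

-- ===== CLAIM (what is proved, stated in full; the proofs are below) =====
def Claim_equal_csv_escape_py : Prop := ∀ (value : String), Dom_csv_escape_py value → Spec_csv_escape_py value (csv_escape_py value)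

-- ===== LEMMAS AND PROOFS =====

def csvSpecial (c : Char) : Bool := c = ';' || c = '\n' || c = '\r' || c = '"'

def csvDouble (c : Char) : List Char := if c = '"' then ['"', '"'] else [c]

theorem csvAlt_foldl (l : List Char) (buf : List Char) (fl : Bool) :
    l.foldl csvAltStep (buf, fl) = (buf ++ l.flatMap csvDouble, fl || l.any csvSpecial) := by
  induction l generalizing buf fl with
  | nil => simp
  | cons c t ih =>
    simp only [List.foldl_cons, csvAltStep, List.flatMap_cons, List.any_cons]
    by_cases hc : c = '"' <;>
      simp [hc, ih, csvDouble, csvSpecial, Bool.or_assoc, Bool.or_comm]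

theorem replace_go_quote (l : List Char) (fuel : Nat) (acc : List Char)
    (h : l.length ≤ fuel) :
    PySem.Chars.replace.go ['"'] ['"', '"'] fuel l acc
      = acc.reverse ++ l.flatMap csvDouble := by
  induction l generalizing fuel acc with
  | nil => cases fuel <;> simp [PySem.Chars.replace.go]
  | cons c t ih =>
    cases fuel with
    | zero => simp at h
    | succ fuel =>
      simp only [List.length_cons, Nat.add_le_add_iff_right] at h
      by_cases hc : c = '"'
      · subst hc
        have hp : List.isPrefixOf ['"'] ('"' :: t) = true := by
          simp [List.isPrefixOf]
        simp only [PySem.Chars.replace.go, hp, if_true]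
        simp only [List.length_singleton, List.drop_succ_cons, List.drop_zero]
        rw [ih fuel _ h]
        simp [csvDouble]
      · have hp : List.isPrefixOf ['"'] (c :: t) = false := by
          simp only [List.isPrefixOf, Bool.and_eq_false_iff, beq_eq_false_iff_ne, ne_eq]
          exact Or.inl (fun h' => hc h'.symm)
        simp only [PySem.Chars.replace.go, hp, Bool.false_eq_true, if_false]
        rw [ih fuel _ h]
        simp [csvDouble, hc]

theorem replace_quote (l : List Char) :
    PySem.Chars.replace l ['"'] ['"', '"'] = l.flatMap csvDouble := by
  rw [PySem.Chars.replace]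
  simp only [List.isEmpty_cons, if_false, Bool.false_eq_true]
  exact replace_go_quote l l.length [] le_rfl

theorem isIn_singleton (c : Char) (l : List Char) :
    PySem.Chars.isIn [c] l = l.any (fun x => x = c) := by
  by_cases h : c ∈ l
  · obtain ⟨s, t, rfl⟩ := List.append_of_mem h
    rw [(PySem.Chars.isIn_iff_infix _ _).mpr ⟨s, t, by simp⟩]
    symm
    simp only [List.any_eq_true, decide_eq_true_eq]
    exact ⟨c, h, rfl⟩
  · rw [(PySem.Chars.isIn_eq_false_iff _ _).mpr (fun hinf => h (hinf.subset (by simp)))]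
    symm
    simp only [Bool.eq_false_iff, ne_eq, List.any_eq_true, decide_eq_true_eq, not_exists, not_and]
    intro x hx hxc
    exact h (hxc ▸ hx)

theorem anyA_eq (l : List Char) :
    ([";", "\n", "\r", "\""].any (fun ch => PySem.Chars.isIn ch.toList l)) = l.any csvSpecial := by
  have h1 : (";" : String).toList = [';'] := rfl
  have h2 : ("\n" : String).toList = ['\n'] := rfl
  have h3 : ("\r" : String).toList = ['\r'] := rfl
  have h4 : ("\"" : String).toList = ['"'] := rfl
  simp only [List.any_cons, List.any_nil, h1, h2, h3, h4, isIn_singleton, Bool.or_false]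
  induction l with
  | nil => simp
  | cons c t ih =>
    simp only [List.any_cons, csvSpecial] at *
    rw [← ih]
    by_cases hc : c = ';' <;> by_cases hn : c = '\n' <;> by_cases hr : c = '\r' <;>
      by_cases hq : c = '"' <;> simp [hc, hn, hr, hq, Bool.or_assoc, Bool.or_comm]

-- ===== VERDICT (by name: the statement is the Claim_ definition above) =====
theorem csv_escape_py_spec : Claim_equal_csv_escape_py := by
  intro value _
  unfold Spec_csv_escape_py csv_escape_py csv_escape_py_alt
  rw [csvAlt_foldl]
  simp only [Bool.false_or, List.nil_append]
  have hcond : ([";", "\n", "\r", "\""].any (fun ch => PySem.Str.isIn ch value))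
      = value.toList.any csvSpecial := by
    simp only [PySem.Str.isIn_eq]
    exact anyA_eq value.toList
  rw [hcond]
  by_cases h : value.toList.any csvSpecial = true
  · simp only [h, if_true]
    have : (PySem.Str.replace value "\"" "\"\"").toList
        = value.toList.flatMap csvDouble := by
      rw [PySem.Str.toList_replace]
      exact replace_quote value.toList
    rw [this]
  · simp only [h]
    rfl
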